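-- pv_equiv track=rewrite | github.com/Dyslate/Rootme | multiple-encoding.py | is_ipv6_encoded
-- ===== SOURCE A (Python) =====
-- def is_ipv6_encoded(input_string):
--     # Check the string length
--     if len(input_string) % 5 != 0:
--         return False
--
--     # Check for valid characters and patterns
--     for char in input_string:
--         if not (33 <= ord(char) <= 117 or char == "z"):
--             return False
--
--     # Check if the string starts with 'X' and ends with '<'
--     if not (input_string.startswith("X") and input_string.endswith("<")):
--         return False
--
--     # Check if there are no repeated 'z' characters
--     if "zz" in input_string:
--         return False
--
--     # Check if there are at least 5 valid characters in each group
--     for i in range(0, len(input_string), 5):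
--         group = input_string[i : i + 5]
--         if group.count("z") > 1:
--             return False
--
--     return True
-- ===== SOURCE B (Python) =====
-- def is_ipv6_encoded(input_string):
--     n = len(input_string)
--     if n == 0 or n % 5 != 0:
--         return False
--     if input_string[0] != 'X' or input_string[-1] != '<':
--         return False
--     prev_z = False
--     zc = 0
--     for i, ch in enumerate(input_string):
--         if i % 5 == 0:
--             zc = 0
--         if ch == 'z':
--             if prev_z or zc == 1:
--                 return False
--             prev_z = True
--             zc = 1
--         elif 33 <= ord(ch) <= 117:
--             prev_z = False
--         else:
--             return False
--     return True
-- ===== Notes on version B (the rewrite author's own statement) =====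
-- stated objective: simpler
-- what changed: A's four separate passes (character scan, repeated-z substring scan, start/end checks after them, and a per-group slice-and-count loop) are replaced by explicit first/last-char guards plus ONE fused scan that validates each character, detects adjacent z's via the previous character, and bounds z's per 5-group with a counter reset at i % 5 == 0.
import Mathlib
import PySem

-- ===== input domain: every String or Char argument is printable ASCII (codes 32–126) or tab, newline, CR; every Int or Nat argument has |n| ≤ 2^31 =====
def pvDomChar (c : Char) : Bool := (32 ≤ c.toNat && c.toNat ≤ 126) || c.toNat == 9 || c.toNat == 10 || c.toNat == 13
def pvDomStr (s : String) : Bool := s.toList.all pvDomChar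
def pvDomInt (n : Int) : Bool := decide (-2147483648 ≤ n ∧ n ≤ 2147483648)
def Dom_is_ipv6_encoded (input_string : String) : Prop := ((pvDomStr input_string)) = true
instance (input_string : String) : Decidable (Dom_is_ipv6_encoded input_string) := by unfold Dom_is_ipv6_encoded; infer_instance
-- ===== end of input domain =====

-- B replaces A's four separate passes (char scan, double-z substring scan, start/end checks,
-- per-group slice-and-count loop) by first/last-char guards plus ONE fused scan; same O(n), simpler.

-- ===== PORT A =====
-- "for char in input_string: if not (33 <= ord(char) <= 117 or char == 'z'): return False"
def pvCharLoopA : List Char → Bool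
  | [] => true
  | c :: r => if 33 ≤ c.toNat ∧ c.toNat ≤ 117 ∨ c = 'z' then pvCharLoopA r else false

-- "for i in range(0, len(input_string), 5): group = input_string[i:i+5]; if group.count('z') > 1: return False"
def pvGroupLoopA (l : List Char) : List Int → Bool
  | [] => true
  | i :: is =>
      if 1 < PySem.Chars.count (PySem.List.slice l (some i) (some (i + 5))) ['z'] then false
      else pvGroupLoopA l is

def is_ipv6_encoded (input_string : String) : Bool :=
  let l := input_string.toList
  if l.length % 5 ≠ 0 then false
  else if ¬ pvCharLoopA l then false
  else if ¬ (PySem.Str.startswith input_string "X" && PySem.Str.endswith input_string "<") then false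
  else if PySem.Str.isIn "zz" input_string then false
  else pvGroupLoopA l (PySem.List.pyRange 0 (l.length : Int) 5)

-- ===== PORT B =====
-- the fused loop of Source B, state (i, prev_z, zc)
def pvLoopB : List Char → Nat → Bool → Nat → Bool
  | [], _, _, _ => true
  | c :: r, i, prevZ, zc =>
      let zc' := if i % 5 = 0 then 0 else zc
      if c = 'z' then
        if prevZ = true ∨ zc' = 1 then false else pvLoopB r (i + 1) true 1
      else if 33 ≤ c.toNat ∧ c.toNat ≤ 117 then pvLoopB r (i + 1) false zc'
      else false

def is_ipv6_encoded_alt (input_string : String) : Bool :=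
  let l := input_string.toList
  if l.length = 0 ∨ l.length % 5 ≠ 0 then false
  else if ¬ (PySem.List.pyGet? l 0 = some 'X') ∨ ¬ (PySem.List.pyGet? l (-1) = some '<') then false
  else pvLoopB l 0 false 0

-- ===== PRECONDITION & SPEC =====
def Spec_is_ipv6_encoded (input_string : String) (out : Bool) : Prop := out = is_ipv6_encoded_alt input_string
instance (input_string : String) (out : Bool) : Decidable (Spec_is_ipv6_encoded input_string out) := by unfold Spec_is_ipv6_encoded; infer_instance

-- ===== CLAIM (what is proved, stated in full; the proofs are below) =====
def Claim_equal_is_ipv6_encoded : Prop := ∀ (input_string : String), Dom_is_ipv6_encoded input_string → Spec_is_ipv6_encoded input_string (is_ipv6_encoded input_string)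

-- ===== LEMMAS AND PROOFS =====

-- "no adjacent 'z' from a carried previous-char flag"
def pvNoZZ : Bool → List Char → Bool
  | _, [] => true
  | p, c :: r => if c = 'z' then !p && pvNoZZ true r else pvNoZZ false r

-- "at most one 'z' per 5-group, counted from index i with running count zc"
def pvZfrom : Nat → Nat → List Char → Bool
  | _, _, [] => true
  | i, zc, c :: r =>
      let zc' := if i % 5 = 0 then 0 else zc
      if c = 'z' then decide (zc' = 0) && pvZfrom (i + 1) 1 r else pvZfrom (i + 1) zc' r

-- "at most one 'z' in every chunk of 5"
def pvCz : List Char → Bool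
  | [] => true
  | c :: r => decide ((c :: r.take 4).count 'z' ≤ 1) && pvCz (r.drop 4)
  termination_by l => l.length
  decreasing_by simp

-- "some two adjacent characters are both 'z'"
def pvHasZZ : List Char → Bool
  | [] => false
  | [_] => false
  | c :: d :: r => (decide (c = 'z') && decide (d = 'z')) || pvHasZZ (d :: r)

-- B's fused loop is the conjunction of the three independent scans
theorem pvLoopB_decompose (r : List Char) : ∀ (i : Nat) (p : Bool) (zc : Nat), zc ≤ 1 →
    pvLoopB r i p zc = (pvCharLoopA r && pvNoZZ p r && pvZfrom i zc r) := by
  induction r with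
  | nil => intro i p zc _; simp [pvLoopB, pvCharLoopA, pvNoZZ, pvZfrom]
  | cons c r ih =>
    intro i p zc hzc
    by_cases hc : c = 'z'
    · subst hc
      by_cases h5 : i % 5 = 0 <;> cases p <;> interval_cases zc <;>
        simp [pvLoopB, pvCharLoopA, pvNoZZ, pvZfrom, h5, ih, Bool.and_assoc]
    · by_cases hv : 33 ≤ c.toNat ∧ c.toNat ≤ 117
      · by_cases h5 : i % 5 = 0 <;>
          simp [pvLoopB, pvCharLoopA, pvNoZZ, pvZfrom, hc, hv, h5, ih _ _ _ hzc, ih]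
      · simp [pvLoopB, pvCharLoopA, pvNoZZ, pvZfrom, hc, hv]

theorem pvNoZZ_eq (l : List Char) : ∀ p : Bool,
    pvNoZZ p l = (!pvHasZZ l && !(p && decide (l.head? = some 'z'))) := by
  induction l with
  | nil => intro p; simp [pvNoZZ, pvHasZZ]
  | cons c r ih =>
    intro p
    cases r with
    | nil => by_cases hc : c = 'z' <;> cases p <;> simp [pvNoZZ, pvHasZZ, hc]
    | cons d t =>
      by_cases hc : c = 'z'
      · subst hc
        rw [show pvNoZZ p ('z' :: d :: t) = (!p && pvNoZZ true (d :: t)) from by simp [pvNoZZ]]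
        rw [ih]
        by_cases hd : d = 'z' <;> cases p <;> simp [pvHasZZ, hd]
      · rw [show pvNoZZ p (c :: d :: t) = pvNoZZ false (d :: t) from by simp [pvNoZZ, hc]]
        rw [ih]
        simp [pvHasZZ, hc]

theorem pvHasZZ_iff (l : List Char) : pvHasZZ l = true ↔ ['z', 'z'] <:+: l := by
  induction l with
  | nil => simp [pvHasZZ]
  | cons c r ih =>
    cases r with
    | nil => simp [pvHasZZ, List.infix_cons_iff, List.cons_prefix_cons]
    | cons d t =>
      rw [List.infix_cons_iff]
      simp [pvHasZZ, ih, List.cons_prefix_cons]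
      tauto

theorem pvCount_go (fuel : Nat) : ∀ (s : List Char) (acc : Nat), s.length ≤ fuel →
    PySem.Chars.count.go ['z'] fuel s acc = acc + s.count 'z' := by
  induction fuel with
  | zero =>
    intro s acc h
    obtain rfl : s = [] := List.eq_nil_of_length_eq_zero (by omega)
    simp [PySem.Chars.count.go]
  | succ f ih =>
    intro s acc h
    cases s with
    | nil => simp [PySem.Chars.count.go]
    | cons c t =>
      by_cases hc : c = 'z'
      · subst hc
        simp only [PySem.Chars.count.go, List.isPrefixOf, List.count_cons]
        simp [ih t (acc + 1) (by simpa using Nat.lt_succ_iff.mp (by simpa using h))]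
        omega
      · simp only [PySem.Chars.count.go, List.isPrefixOf]
        simp [hc, Ne.symm hc, ih t acc (by simpa using Nat.lt_succ_iff.mp (by simpa using h))]

-- str.count with a single-character needle is the character count
theorem pvCount_single (s : List Char) : PySem.Chars.count s ['z'] = s.count 'z' := by
  simp [PySem.Chars.count, pvCount_go s.length s 0 le_rfl]

theorem pvRange5_cons (a b : Int) (h : a < b) :
    PySem.List.pyRange a b 5 = a :: PySem.List.pyRange (a + 5) b 5 := by
  rw [PySem.List.pyRange_of_pos a b (by norm_num), PySem.List.pyRange_of_pos (a + 5) b (by norm_num)]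
  rw [if_pos h]
  by_cases h5 : a + 5 < b
  · rw [if_pos h5]
    have : ((b - a + 5 - 1) / 5).toNat = ((b - (a + 5) + 5 - 1) / 5).toNat + 1 := by omega
    rw [this, List.range_succ_eq_map]
    simp [List.map_map, Function.comp_def]
    intro k _
    ring
  · rw [if_neg h5]
    have : ((b - a + 5 - 1) / 5).toNat = 1 := by omega
    rw [this]
    simp

theorem pvRange5_nil (a b : Int) (h : b ≤ a) : PySem.List.pyRange a b 5 = [] := by
  rw [PySem.List.pyRange_of_pos a b (by norm_num), if_neg (by omega)]
  simp

-- A's slice-and-count group loop is the chunked check pvCz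
theorem pvGroupLoopA_eq (m : Nat) : ∀ (k : Nat) (l : List Char), l.length ≤ k + m →
    pvGroupLoopA l (PySem.List.pyRange (k : Int) (l.length : Int) 5) = pvCz (l.drop k) := by
  induction m with
  | zero =>
    intro k l h
    rw [pvRange5_nil _ _ (by exact_mod_cast h), List.drop_eq_nil_of_le (by omega)]
    simp [pvGroupLoopA, pvCz]
  | succ m ih =>
    intro k l h
    by_cases hk : k < l.length
    · rw [pvRange5_cons _ _ (by exact_mod_cast hk)]
      cases hd : l.drop k with
      | nil => exfalso; have := congrArg List.length hd; simp at this; omega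
      | cons c r =>
        have hsl : PySem.List.slice l (some (k : Int)) (some ((k : Int) + 5)) = (l.drop k).take 5 := by
          have h5 : ((k : Int) + 5) = ((k + 5 : Nat) : Int) := by push_cast; ring
          rw [h5, PySem.List.slice_natCast]
          congr 1
          omega
        have hdrop : l.drop (k + 5) = r.drop 4 := by
          rw [show k + 5 = k + 1 + 4 from by omega]
          rw [← List.drop_drop, ← List.drop_drop]
          rw [show l.drop k = c :: r from hd]
          simp
        simp only [pvGroupLoopA, hsl, hd, pvCount_single]
        rw [show ((k : Int) + 5) = ((k + 5 : Nat) : Int) from by push_cast; ring]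
        rw [show (c :: r).take 5 = c :: r.take 4 from by simp]
        rw [pvCz, ← hdrop, ih (k + 5) l (by omega)]
        by_cases hcnt : 1 < (c :: r.take 4).count 'z'
        · simp [hcnt, show ¬((c :: r.take 4).count 'z' ≤ 1) from by omega]
        · simp [hcnt, show (c :: r.take 4).count 'z' ≤ 1 from by omega]
    · rw [pvRange5_nil _ _ (by exact_mod_cast Nat.le_of_not_lt hk), List.drop_eq_nil_of_le (by omega)]
      simp [pvGroupLoopA, pvCz]

theorem pvZfrom_reset (i zc : Nat) (h : i % 5 = 0) (l : List Char) :
    pvZfrom i zc l = pvZfrom i 0 l := by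
  cases l <;> simp [pvZfrom, h]

-- B's indexed z-counter scan is the chunked check pvCz
theorem pvZfrom_eq (m : Nat) : ∀ (l : List Char) (i : Nat), l.length ≤ 5 * m → i % 5 = 0 →
    pvZfrom i 0 l = pvCz l := by
  induction m with
  | zero =>
    intro l i h _
    obtain rfl : l = [] := List.eq_nil_of_length_eq_zero (by omega)
    simp [pvZfrom, pvCz]
  | succ m ih =>
    intro l i hlen hi
    have h1 : ¬ (i + 1) % 5 = 0 := by omega
    have h2 : ¬ (i + 2) % 5 = 0 := by omega
    have h3 : ¬ (i + 3) % 5 = 0 := by omega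
    have h4 : ¬ (i + 4) % 5 = 0 := by omega
    have h5 : (i + 5) % 5 = 0 := by omega
    rcases l with _ | ⟨a, _ | ⟨b, _ | ⟨c, _ | ⟨d, _ | ⟨e, rest⟩⟩⟩⟩⟩
    · simp [pvZfrom, pvCz]
    · by_cases ha : a = 'z' <;>
        simp [pvZfrom, pvCz, hi, ha, List.count_nil]
    · by_cases ha : a = 'z' <;> by_cases hb : b = 'z' <;>
        simp [pvZfrom, pvCz, hi, h1, ha, hb, List.count_nil]
    · by_cases ha : a = 'z' <;> by_cases hb : b = 'z' <;> by_cases hc : c = 'z' <;>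
        simp [pvZfrom, pvCz, hi, h1, h2, ha, hb, hc, List.count_nil]
    · by_cases ha : a = 'z' <;> by_cases hb : b = 'z' <;> by_cases hc : c = 'z' <;>
        by_cases hd : d = 'z' <;>
        simp [pvZfrom, pvCz, hi, h1, h2, h3, ha, hb, hc, hd, List.count_nil]
    · have ihr := ih rest (i + 5) (by simp at hlen ⊢; omega) h5
      have hre := pvZfrom_reset (i + 5) 1 h5 rest
      by_cases ha : a = 'z' <;> by_cases hb : b = 'z' <;> by_cases hc : c = 'z' <;>
        by_cases hd : d = 'z' <;> by_cases he : e = 'z' <;>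
        simp [pvZfrom, pvCz, hi, h1, h2, h3, h4, ha, hb, hc, hd, he, ihr, hre, List.count_nil]

theorem pvSW (c : Char) (r : List Char) :
    PySem.Chars.startswith (c :: r) ['X'] = decide (c = 'X') := by
  rw [Bool.eq_iff_iff, PySem.Chars.startswith_iff]
  simp [List.cons_prefix_cons, eq_comm]

theorem pvEW (l : List Char) :
    PySem.Chars.endswith l ['<'] = decide (l.getLast? = some '<') := by
  rw [Bool.eq_iff_iff, PySem.Chars.endswith_iff]
  simp [List.getLast?_eq_some_iff, List.IsSuffix]
  constructor
  · rintro ⟨t, rfl⟩; exact ⟨t, rfl⟩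
  · rintro ⟨t, rfl⟩; exact ⟨t, rfl⟩

theorem pvIsInZZ (l : List Char) : PySem.Chars.isIn ['z', 'z'] l = pvHasZZ l := by
  rw [Bool.eq_iff_iff, PySem.Chars.isIn_iff_infix, pvHasZZ_iff l]

-- both ports, as functions of the character list
theorem pvKey (l : List Char) :
    (if l.length % 5 ≠ 0 then false
     else if ¬ pvCharLoopA l then false
     else if ¬ (PySem.Chars.startswith l ['X'] && PySem.Chars.endswith l ['<']) then false
     else if PySem.Chars.isIn ['z', 'z'] l then false
     else pvGroupLoopA l (PySem.List.pyRange 0 (l.length : Int) 5))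
    =
    (if l.length = 0 ∨ l.length % 5 ≠ 0 then false
     else if ¬ (PySem.List.pyGet? l 0 = some 'X') ∨ ¬ (PySem.List.pyGet? l (-1) = some '<') then false
     else pvLoopB l 0 false 0) := by
  cases l with
  | nil =>
    simp [pvCharLoopA, show PySem.Chars.startswith ([] : List Char) ['X'] = false from rfl]
  | cons c r =>
    by_cases h5 : (c :: r).length % 5 = 0
    · have h5' : (r.length + 1) % 5 = 0 := by simpa using h5
      have hlen0 : ¬ (c :: r).length = 0 := by simp
      rw [pvSW, pvEW, pvIsInZZ, PySem.List.pyGet?_neg_one]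
      rw [show PySem.List.pyGet? (c :: r) 0 = some c from by
        simpa using PySem.List.pyGet?_natCast (c :: r) 0]
      by_cases hX : c = 'X'
      · subst hX
        by_cases hLt : (('X' : Char) :: r).getLast? = some '<'
        · have hB : pvLoopB ('X' :: r) 0 false 0 =
              (pvCharLoopA ('X' :: r) && !pvHasZZ ('X' :: r) && pvCz ('X' :: r)) := by
            rw [pvLoopB_decompose ('X' :: r) 0 false 0 (by omega)]
            rw [pvNoZZ_eq, pvZfrom_eq ('X' :: r).length ('X' :: r) 0 (by omega) (by omega)]
            simp
          have hG : pvGroupLoopA ('X' :: r) (PySem.List.pyRange 0 (('X' :: r).length : Int) 5) =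
              pvCz ('X' :: r) := by
            have := pvGroupLoopA_eq ('X' :: r).length 0 ('X' :: r) (by omega)
            simpa using this
          simp only [hB, hG]
          by_cases hch : pvCharLoopA ('X' :: r) <;> by_cases hzz : pvHasZZ ('X' :: r) <;>
            simp [hch, hzz, h5', hLt]
        · by_cases hch : pvCharLoopA ('X' :: r) <;> simp [h5', hLt, hch]
      · by_cases hch : pvCharLoopA (c :: r) <;> simp [h5', hX, hch]
    · have h5' : ¬ (r.length + 1) % 5 = 0 := by simpa using h5
      simp [h5']

-- ===== VERDICT (by name: the statement is the Claim_ definition above) =====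
theorem is_ipv6_encoded_spec : Claim_equal_is_ipv6_encoded := by
  intro s _
  unfold Spec_is_ipv6_encoded is_ipv6_encoded is_ipv6_encoded_alt
  simp only [PySem.Str.startswith_eq, PySem.Str.endswith_eq, PySem.Str.isIn_eq]
  simp only [show ("X" : String).toList = ['X'] from rfl, show ("<" : String).toList = ['<'] from rfl,
    show ("zz" : String).toList = ['z', 'z'] from rfl]
  exact pvKey s.toList
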